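-- pv_equiv track=rewrite | github.com/EggheadJohnson/AdventOfCode2021 | day17/solutions.py | getPotentialXVelocities
-- ===== SOURCE A (Python) =====
-- def getTriangleNumbers(i=100):
--     triangleNums = [1]
--     for j in range(2, i+1):
--         triangleNums.append(triangleNums[-1] + j)
--     return triangleNums
--
-- def getXSteps(xVelocity, xTarget):
--     stepCtr = 0
--     xPos = 0
--     steps = []
--     while xVelocity > 0 and xPos <= max(xTarget):
--         xPos += xVelocity
--         xVelocity -= 1
--         stepCtr += 1
--         if xPos in range(xTarget[0], xTarget[1] + 1):
--             steps.append(stepCtr)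
--     return steps
--
-- def getPotentialXVelocities(xTarget):
--     xMax = max(xTarget)
--     xMin = min(xTarget)
--     potentialVelocities = getTriangleNumbers(xMax)
--     xVelocitiesBySteps = {}
--     for xv in range(xMax):
--         steps = getXSteps(xv, xTarget)
--         for step in steps:
--             if step not in xVelocitiesBySteps:
--                 xVelocitiesBySteps[step] = set()
--             xVelocitiesBySteps[step].add(xv)
--     return xVelocitiesBySteps
-- ===== SOURCE B (Python) =====
-- def getPotentialXVelocities(xTarget):
--     # For velocity v the probe's x-position after s steps (1 <= s <= v) is
--     # s*v - s*(s-1)//2, strictly increasing in s up to s = v.  So the steps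
--     # that land in [xTarget[0], xTarget[1]] form one contiguous interval
--     # [sLo, sHi], found by binary search instead of simulating the steps.
--     xMax = max(xTarget)
--     t0, t1 = xTarget[0], xTarget[1]
--     result = {}
--     for v in range(xMax):
--         # smallest s in [1, v+1] with pos(s) >= t0  (v+1 = sentinel: none)
--         a, b = 1, v + 1
--         while a < b:
--             m = (a + b) // 2
--             if t0 <= m * v - m * (m - 1) // 2:
--                 b = m
--             else:
--                 a = m + 1
--         sLo = a
--         # largest s in [0, v] with pos(s) <= t1  (0 = sentinel: none)
--         a, b = 0, v
--         while a < b: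
--             m = (a + b + 1) // 2
--             if m * v - m * (m - 1) // 2 <= t1:
--                 a = m
--             else:
--                 b = m - 1
--         sHi = a
--         for s in range(sLo, sHi + 1):
--             result.setdefault(s, set()).add(v)
--     return result
-- ===== Notes on version B (the rewrite author's own statement) =====
-- stated objective: faster
-- what changed: Instead of simulating the probe's flight step by step for every velocity (up to v steps each, O(xMax^2) worst case), B uses the closed-form position s*v - s*(s-1)//2 and finds the contiguous interval of hitting step counts by two O(log v) binary searches per velocity; the unused triangle-number table is dropped.
-- outside the precondition, e.g. on getPotentialXVelocities([1]): A returns {}, B raises IndexError; on getPotentialXVelocities([]): A raises ValueError, B raises ValueError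
import Mathlib
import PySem

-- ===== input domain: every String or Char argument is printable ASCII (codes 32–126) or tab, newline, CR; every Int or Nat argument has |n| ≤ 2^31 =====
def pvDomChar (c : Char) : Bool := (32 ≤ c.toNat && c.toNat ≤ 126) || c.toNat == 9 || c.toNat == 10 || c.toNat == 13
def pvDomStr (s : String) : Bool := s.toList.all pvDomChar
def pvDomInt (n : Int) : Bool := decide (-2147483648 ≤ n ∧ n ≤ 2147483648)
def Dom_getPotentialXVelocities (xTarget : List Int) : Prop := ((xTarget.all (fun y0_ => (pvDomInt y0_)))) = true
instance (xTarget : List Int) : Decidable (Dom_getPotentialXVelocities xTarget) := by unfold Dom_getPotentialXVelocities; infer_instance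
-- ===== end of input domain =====

-- B replaces A's step-by-step flight simulation per velocity by two binary searches for the
-- contiguous step interval hitting the target (objective: faster; measurably so on the timed inputs).

-- ===== PORT A =====
def getTriangleNumbers (i : Int) : List Int :=
  (PySem.List.pyRange 2 (i + 1) 1).foldl
    (fun triangleNums j => triangleNums ++ [PySem.List.pyGetD triangleNums (-1) 0 + j]) [1]
    -- triangleNums is never empty, so pyGetD's default 0 is unreachable

-- the while-loop of getXSteps; fuel = initial xVelocity.toNat bounds its iterations
-- (each iteration requires xVelocity > 0 and decrements it)
def getXStepsGo (fuel : Nat) (xVelocity xPos stepCtr : Int) (steps : List Int)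
    (xTarget : List Int) : List Int :=
  match fuel with
  | 0 => steps
  | Nat.succ fuel =>
    if xVelocity > 0 ∧ xPos ≤ (PySem.List.max? xTarget (fun y => y)).getD 0 then
      -- .getD 0 : max(xTarget) raises only on [], excluded by Pre_
      let xPos' := xPos + xVelocity
      let xVelocity' := xVelocity - 1
      let stepCtr' := stepCtr + 1
      -- 'xPos in range(xTarget[0], xTarget[1] + 1)' = xTarget[0] ≤ xPos < xTarget[1] + 1;
      -- indices 0 and 1 exist under Pre_, so pyGetD's default 0 is unreachable
      let steps' := if PySem.List.pyGetD xTarget 0 0 ≤ xPos' ∧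
                       xPos' < PySem.List.pyGetD xTarget 1 0 + 1
                    then steps ++ [stepCtr'] else steps
      getXStepsGo fuel xVelocity' xPos' stepCtr' steps' xTarget
    else steps

def getXSteps (xVelocity : Int) (xTarget : List Int) : List Int :=
  getXStepsGo xVelocity.toNat xVelocity 0 0 [] xTarget

def getPotentialXVelocities (xTarget : List Int) : List (Int × List Int) :=
  let xMax := (PySem.List.max? xTarget (fun y => y)).getD 0
  let xMin := (PySem.List.min? xTarget (fun y => y)).getD 0
  let potentialVelocities := getTriangleNumbers xMax
  let _unused := (xMin, potentialVelocities)  -- computed and never read, as in A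
  ((PySem.List.pyRange 0 xMax 1).foldl
    (fun d xv =>
      (getXSteps xv xTarget).foldl
        (fun d step =>
          let d1 := if d.contains step = false then d.insert step PySem.Set.empty else d
          d1.modify step PySem.Set.empty (fun s => PySem.Set.add s xv)) d)
    (PySem.Dict.empty : PySem.Dict Int (PySem.Set Int))).items

-- ===== PORT B =====
-- binary search of Source B: smallest s in [a,b] with t0 <= s*v - s*(s-1)//2 (b = sentinel)
def altSearchLo (fuel : Nat) (v t0 a b : Int) : Int :=
  match fuel with
  | 0 => a
  | Nat.succ fuel =>
    if a < b then
      let m := PySem.Int.floordiv (a + b) 2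
      if t0 ≤ m * v - PySem.Int.floordiv (m * (m - 1)) 2 then altSearchLo fuel v t0 a m
      else altSearchLo fuel v t0 (m + 1) b
    else a

-- binary search of Source B: largest s in [a,b] with s*v - s*(s-1)//2 <= t1 (a = sentinel)
def altSearchHi (fuel : Nat) (v t1 a b : Int) : Int :=
  match fuel with
  | 0 => a
  | Nat.succ fuel =>
    if a < b then
      let m := PySem.Int.floordiv (a + b + 1) 2
      if m * v - PySem.Int.floordiv (m * (m - 1)) 2 ≤ t1 then altSearchHi fuel v t1 m b
      else altSearchHi fuel v t1 a (m - 1)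
    else a

def getPotentialXVelocities_alt (xTarget : List Int) : List (Int × List Int) :=
  let xMax := (PySem.List.max? xTarget (fun y => y)).getD 0
  let t0 := PySem.List.pyGetD xTarget 0 0   -- xTarget[0]; exists under Pre_
  let t1 := PySem.List.pyGetD xTarget 1 0   -- xTarget[1]; exists under Pre_
  ((PySem.List.pyRange 0 xMax 1).foldl
    (fun d v =>
      let sLo := altSearchLo v.toNat v t0 1 (v + 1)  -- fuel (b-a).toNat = v.toNat
      let sHi := altSearchHi v.toNat v t1 0 v        -- fuel (b-a).toNat = v.toNat
      (PySem.List.pyRange sLo (sHi + 1) 1).foldl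
        (fun d s => d.modify s PySem.Set.empty (fun st => PySem.Set.add st v)) d)
    (PySem.Dict.empty : PySem.Dict Int (PySem.Set Int))).items

-- ===== PRECONDITION & SPEC =====
-- Pre_ excludes lists with fewer than two elements: there A raises (ValueError on [],
-- IndexError reading xTarget[1]) except on a single-element list with value ≤ 1, where A's
-- loop body never runs and it returns {} while B reads xTarget[1] up front and raises IndexError.
def Pre_getPotentialXVelocities (xTarget : List Int) : Prop := 2 ≤ xTarget.length
instance (xTarget : List Int) : Decidable (Pre_getPotentialXVelocities xTarget) := by
  unfold Pre_getPotentialXVelocities; infer_instance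

def pvWitness_getPotentialXVelocities : List Int := [20, 30]

def Spec_getPotentialXVelocities (xTarget : List Int) (out : List (Int × List Int)) : Prop :=
  out = getPotentialXVelocities_alt xTarget
instance (xTarget : List Int) (out : List (Int × List Int)) :
    Decidable (Spec_getPotentialXVelocities xTarget out) := by
  unfold Spec_getPotentialXVelocities; infer_instance

-- ===== CLAIM (what is proved, stated in full; the proofs are below) =====
def Claim_equal_getPotentialXVelocities : Prop :=
  ∀ (xTarget : List Int), Dom_getPotentialXVelocities xTarget →
    Pre_getPotentialXVelocities xTarget →
    Spec_getPotentialXVelocities xTarget (getPotentialXVelocities xTarget)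

-- ===== LEMMAS AND PROOFS =====

-- the closed-form position after s steps at initial velocity v, as Source B computes it
def tpos (v s : Int) : Int := s * v - PySem.Int.floordiv (s * (s - 1)) 2

lemma tpos_zero (v : Int) : tpos v 0 = 0 := by
  have h : PySem.Int.floordiv 0 2 = 0 := by
    rw [PySem.Int.floordiv_eq_ediv_of_pos (by norm_num)]; rfl
  simp [tpos, h]

lemma tpos_succ (v s : Int) : tpos v (s + 1) = tpos v s + (v - s) := by
  obtain ⟨k, hk⟩ : Even (s * (s - 1)) := by
    have := Int.even_mul_succ_self (s - 1)
    have h : (s - 1) * (s - 1 + 1) = s * (s - 1) := by ring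
    rwa [h] at this
  have hk2 : (s + 1) * ((s + 1) - 1) = (k + s) + (k + s) := by linear_combination hk
  have hd : ∀ a : Int, PySem.Int.floordiv (a + a) 2 = a := by
    intro a
    rw [PySem.Int.floordiv_eq_ediv_of_pos (by norm_num)]
    omega
  unfold tpos
  rw [hk, hk2, hd, hd]
  ring

lemma tpos_mono (v : Int) {s s' : Int} (h0 : 0 ≤ s) (h : s ≤ s') (h2 : s' ≤ v + 1) :
    tpos v s ≤ tpos v s' := by
  obtain ⟨n, hn⟩ : ∃ n : Nat, s' = s + n := ⟨(s' - s).toNat, by omega⟩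
  subst hn
  induction n with
  | zero => simp
  | succ n ih =>
    have hle : s + (n : Int) ≤ v := by push_cast at h2 ⊢; omega
    have := tpos_succ v (s + n)
    have hih := ih (by omega) (by push_cast at h2 ⊢; omega)
    have he : s + ((n : Int) + 1) = (s + n) + 1 := by ring
    push_cast
    rw [he, tpos_succ]
    omega

lemma t1_le_maxD (xTarget : List Int) (hlen : 2 ≤ xTarget.length) :
    PySem.List.pyGetD xTarget 1 0 ≤ (PySem.List.max? xTarget (fun y => y)).getD 0 := by
  obtain ⟨a, b, t, rfl⟩ : ∃ a b t, xTarget = a :: b :: t := by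
    match xTarget with
    | [] => simp at hlen
    | [a] => simp at hlen
    | a :: b :: t => exact ⟨a, b, t, rfl⟩
  have hmax : PySem.List.max? (a :: b :: t) (fun y => y) = some ((b :: t).foldl max a) :=
    PySem.List.max?_id_cons a (b :: t)
  have hget : PySem.List.pyGetD (a :: b :: t) 1 0 = b := by
    simp [PySem.List.pyGetD, PySem.List.pyGet?, PySem.List.pyIdx?]
  have := PySem.List.max?_isMax hmax b (by simp)
  simp only [hmax, Option.getD_some, hget]
  simpa using this

-- A's while-loop produces exactly the steps s in (c, v] whose position lies in the target
lemma goA_eq (xTarget : List Int) (hlen : 2 ≤ xTarget.length) (v : Int) :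
    ∀ (fuel : Nat) (c : Int) (steps : List Int), 0 ≤ c → c ≤ v → (v - c).toNat ≤ fuel →
    getXStepsGo fuel (v - c) (tpos v c) c steps xTarget =
      steps ++ (PySem.List.pyRange (c + 1) (v + 1) 1).filter
        (fun s => decide (PySem.List.pyGetD xTarget 0 0 ≤ tpos v s ∧
                          tpos v s < PySem.List.pyGetD xTarget 1 0 + 1)) := by
  intro fuel
  induction fuel with
  | zero =>
    intro c steps h0 hcv hf
    have hc : c = v := by omega
    subst hc
    rw [PySem.List.pyRange_one_eq_nil (by omega)]
    simp [getXStepsGo]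
  | succ fuel ih =>
    intro c steps h0 hcv hf
    simp only [getXStepsGo]
    by_cases hcond : v - c > 0 ∧ tpos v c ≤ (PySem.List.max? xTarget (fun y => y)).getD 0
    · rw [if_pos hcond]
      have e1 : v - c - 1 = v - (c + 1) := by ring
      have e2 : tpos v c + (v - c) = tpos v (c + 1) := (tpos_succ v c).symm
      have hcv1 : c + 1 ≤ v := by omega
      rw [e1, e2]
      rw [PySem.List.pyRange_one_cons (by omega : c + 1 < v + 1), List.filter_cons]
      by_cases hhit : PySem.List.pyGetD xTarget 0 0 ≤ tpos v (c + 1) ∧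
          tpos v (c + 1) < PySem.List.pyGetD xTarget 1 0 + 1
      · rw [if_pos hhit, ih (c + 1) (steps ++ [c + 1]) (by omega) hcv1 (by omega)]
        simp [hhit, List.append_assoc]
      · rw [if_neg hhit, ih (c + 1) steps (by omega) hcv1 (by omega)]
        have hd : (decide (PySem.List.pyGetD xTarget 0 0 ≤ tpos v (c + 1) ∧
            tpos v (c + 1) < PySem.List.pyGetD xTarget 1 0 + 1)) = false := by
          simp only [decide_eq_false_iff_not]; exact hhit
        rw [hd]
        simp
    · rw [if_neg hcond]
      rcases not_and_or.mp hcond with hvel | hpos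
      · have hc : c = v := by omega
        subst hc
        rw [PySem.List.pyRange_one_eq_nil (by omega)]
        simp
      · have hpos' := lt_of_not_ge hpos
        have hempty : (PySem.List.pyRange (c + 1) (v + 1) 1).filter
            (fun s => decide (PySem.List.pyGetD xTarget 0 0 ≤ tpos v s ∧
                              tpos v s < PySem.List.pyGetD xTarget 1 0 + 1)) = [] := by
          apply List.filter_eq_nil_iff.mpr
          intro s hs
          have hb := PySem.List.mem_pyRange_one.mp hs
          have hmono : tpos v c ≤ tpos v s := tpos_mono v h0 (by omega) (by omega)
          have ht1 := t1_le_maxD xTarget hlen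
          simp only [decide_eq_true_eq]
          intro _
          omega
        rw [hempty]
        simp

lemma stepsA (xTarget : List Int) (hlen : 2 ≤ xTarget.length) (v : Int) (hv : 0 ≤ v) :
    getXSteps v xTarget =
      (PySem.List.pyRange 1 (v + 1) 1).filter
        (fun s => decide (PySem.List.pyGetD xTarget 0 0 ≤ tpos v s ∧
                          tpos v s < PySem.List.pyGetD xTarget 1 0 + 1)) := by
  have h := goA_eq xTarget hlen v v.toNat 0 [] le_rfl hv (by omega)
  simpa [getXSteps, tpos_zero] using h

lemma searchLo_spec (v t0 : Int) :
    ∀ (fuel : Nat) (a b : Int), 1 ≤ a → a ≤ b → b ≤ v + 1 → (b - a).toNat ≤ fuel →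
    (∀ s, 1 ≤ s → s < a → ¬ t0 ≤ tpos v s) → (b = v + 1 ∨ t0 ≤ tpos v b) →
    1 ≤ altSearchLo fuel v t0 a b ∧ altSearchLo fuel v t0 a b ≤ v + 1 ∧
    (∀ s, 1 ≤ s → s < altSearchLo fuel v t0 a b → ¬ t0 ≤ tpos v s) ∧
    (altSearchLo fuel v t0 a b = v + 1 ∨ t0 ≤ tpos v (altSearchLo fuel v t0 a b)) := by
  intro fuel
  induction fuel with
  | zero =>
    intro a b h1 hab hb hf hinv hbp
    have : a = b := by omega
    subst this
    simp only [altSearchLo]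
    exact ⟨h1, hb, hinv, hbp⟩
  | succ fuel ih =>
    intro a b h1 hab hb hf hinv hbp
    simp only [altSearchLo]
    by_cases hlt : a < b
    · rw [if_pos hlt]
      have hmid := PySem.Int.floordiv_two_mid_bounds (le_of_lt hlt)
      have hmb : PySem.Int.floordiv (a + b) 2 < b := by
        rw [PySem.Int.floordiv_lt_iff_lt_mul] <;> omega
      set m := PySem.Int.floordiv (a + b) 2 with hm
      by_cases hp : t0 ≤ m * v - PySem.Int.floordiv (m * (m - 1)) 2
      · rw [if_pos hp]
        have hp' : t0 ≤ tpos v m := hp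
        exact ih a m h1 hmid.1 (by omega) (by omega) hinv (Or.inr hp')
      · rw [if_neg hp]
        have hp' : ¬ t0 ≤ tpos v m := hp
        refine ih (m + 1) b (by omega) (by omega) hb (by omega) ?_ hbp
        intro s hs1 hsm
        intro hts
        by_cases hsa : s < a
        · exact hinv s hs1 hsa hts
        · exact hp' (le_trans hts (tpos_mono v (by omega) (by omega) (by omega)))
    · rw [if_neg hlt]
      have : a = b := by omega
      subst this
      exact ⟨h1, hb, hinv, hbp⟩

lemma searchHi_spec (v t1 : Int) (hv : 0 ≤ v) :
    ∀ (fuel : Nat) (a b : Int), 0 ≤ a → a ≤ b → b ≤ v → (b - a).toNat ≤ fuel →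
    (∀ s, b < s → s ≤ v → ¬ tpos v s ≤ t1) → (a = 0 ∨ tpos v a ≤ t1) →
    0 ≤ altSearchHi fuel v t1 a b ∧ altSearchHi fuel v t1 a b ≤ v ∧
    (∀ s, altSearchHi fuel v t1 a b < s → s ≤ v → ¬ tpos v s ≤ t1) ∧
    (altSearchHi fuel v t1 a b = 0 ∨ tpos v (altSearchHi fuel v t1 a b) ≤ t1) := by
  intro fuel
  induction fuel with
  | zero =>
    intro a b h0 hab hb hf hinv hap
    have : a = b := by omega
    subst this
    simp only [altSearchHi]
    exact ⟨h0, hb, hinv, hap⟩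
  | succ fuel ih =>
    intro a b h0 hab hb hf hinv hap
    simp only [altSearchHi]
    by_cases hlt : a < b
    · rw [if_pos hlt]
      have hma : a + 1 ≤ PySem.Int.floordiv (a + b + 1) 2 := by
        rw [PySem.Int.le_floordiv_iff_mul_le] <;> omega
      have hmb : PySem.Int.floordiv (a + b + 1) 2 ≤ b := by
        have h' : PySem.Int.floordiv (a + b + 1) 2 < b + 1 := by
          rw [PySem.Int.floordiv_lt_iff_lt_mul] <;> omega
        omega
      set m := PySem.Int.floordiv (a + b + 1) 2 with hm
      by_cases hp : m * v - PySem.Int.floordiv (m * (m - 1)) 2 ≤ t1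
      · rw [if_pos hp]
        have hp' : tpos v m ≤ t1 := hp
        exact ih m b (by omega) hmb hb (by omega) hinv (Or.inr hp')
      · rw [if_neg hp]
        have hp' : ¬ tpos v m ≤ t1 := hp
        refine ih a (m - 1) h0 (by omega) (by omega) (by omega) ?_ hap
        intro s hsm hsv
        intro hts
        by_cases hsb : b < s
        · exact hinv s hsb hsv hts
        · exact hp' (le_trans (tpos_mono v (by omega) (by omega) (by omega)) hts)
    · rw [if_neg hlt]
      have : a = b := by omega
      subst this
      exact ⟨h0, hb, hinv, hap⟩

lemma filter_pyRange_interval (p : Int → Bool) (lo hi : Int) :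
    ∀ (n : Nat) (a b : Int), (b - a).toNat ≤ n →
    (∀ s, a ≤ s → s < b → (p s = true ↔ (lo ≤ s ∧ s ≤ hi))) →
    (PySem.List.pyRange a b 1).filter p =
      PySem.List.pyRange (max a lo) (min (hi + 1) b) 1 := by
  intro n
  induction n with
  | zero =>
    intro a b hf _
    rw [PySem.List.pyRange_one_eq_nil (by omega),
        PySem.List.pyRange_one_eq_nil
          (le_trans (min_le_right _ _) (le_trans (by omega) (le_max_left _ _)))]
    rfl
  | succ n ih =>
    intro a b hf hpt
    by_cases hab : a < b
    · rw [PySem.List.pyRange_one_cons hab, List.filter_cons]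
      by_cases hp : p a = true
      · obtain ⟨hal1, hal2⟩ : lo ≤ a ∧ a ≤ hi := (hpt a le_rfl hab).mp hp
        rw [if_pos hp,
            ih (a + 1) b (by omega) (fun s hs1 hs2 => hpt s (by omega) hs2)]
        have e1 : max (a + 1) lo = a + 1 := by omega
        have e2 : max a lo = a := by omega
        have hmin : a < min (hi + 1) b := by omega
        rw [e1, e2, ← PySem.List.pyRange_one_cons hmin]
      · have hal : ¬ (lo ≤ a ∧ a ≤ hi) := fun h => hp ((hpt a le_rfl hab).mpr h)
        rw [Decidable.not_and_iff_or_not, not_le, not_le] at hal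
        rw [if_neg hp,
            ih (a + 1) b (by omega) (fun s hs1 hs2 => hpt s (by omega) hs2)]
        by_cases hla : a < lo
        · have e1 : max (a + 1) lo = max a lo := by omega
          rw [e1]
        · have hhi : hi < a := by omega
          rw [PySem.List.pyRange_one_eq_nil
                (le_trans (min_le_left _ _) (le_trans (by omega) (le_max_left _ _))),
              PySem.List.pyRange_one_eq_nil
                (le_trans (min_le_left _ _) (le_trans (by omega) (le_max_left _ _)))]
    · rw [PySem.List.pyRange_one_eq_nil (by omega),
          PySem.List.pyRange_one_eq_nil
            (le_trans (min_le_right _ _) (le_trans (by omega) (le_max_left _ _)))]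
      rfl

-- the two step lists coincide
lemma steps_eq (xTarget : List Int) (hlen : 2 ≤ xTarget.length) (v : Int) (hv : 0 ≤ v) :
    getXSteps v xTarget =
      PySem.List.pyRange
        (altSearchLo v.toNat v (PySem.List.pyGetD xTarget 0 0) 1 (v + 1))
        (altSearchHi v.toNat v (PySem.List.pyGetD xTarget 1 0) 0 v + 1) 1 := by
  set t0 := PySem.List.pyGetD xTarget 0 0 with ht0
  set t1 := PySem.List.pyGetD xTarget 1 0 with ht1
  obtain ⟨hLo1, hLo2, hLo3, hLo4⟩ :=
    searchLo_spec v t0 v.toNat 1 (v + 1) le_rfl (by omega) le_rfl (by omega)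
      (fun s hs1 hs2 => absurd hs2 (by omega)) (Or.inl rfl)
  obtain ⟨hHi1, hHi2, hHi3, hHi4⟩ :=
    searchHi_spec v t1 hv v.toNat 0 v le_rfl hv le_rfl (by omega)
      (fun s hs1 hs2 => absurd hs1 (by omega)) (Or.inl rfl)
  set sLo := altSearchLo v.toNat v t0 1 (v + 1) with hsLo
  set sHi := altSearchHi v.toNat v t1 0 v with hsHi
  rw [stepsA xTarget hlen v hv]
  have hpt : ∀ s, (1:Int) ≤ s → s < v + 1 →
      ((fun s => decide (t0 ≤ tpos v s ∧ tpos v s < t1 + 1)) s = true ↔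
        (sLo ≤ s ∧ s ≤ sHi)) := by
    intro s hs1 hs2
    simp only [decide_eq_true_eq]
    constructor
    · rintro ⟨hP, hQ⟩
      constructor
      · by_contra hcon
        exact hLo3 s hs1 (by omega) hP
      · by_contra hcon
        exact hHi3 s (by omega) (by omega) (by omega)
    · rintro ⟨hsl, hsh⟩
      constructor
      · rcases hLo4 with h | h
        · omega
        · exact le_trans h (tpos_mono v (by omega) hsl (by omega))
      · rcases hHi4 with h | h
        · omega
        · have := le_trans (tpos_mono v (by omega) hsh (by omega)) h
          omega
  rw [filter_pyRange_interval _ sLo sHi (v + 1 - 1).toNat 1 (v + 1) (by omega) hpt]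
  have e1 : max 1 sLo = sLo := by omega
  have e2 : min (sHi + 1) (v + 1) = sHi + 1 := by omega
  rw [e1, e2]

-- A's conditional-insert-then-add equals B's setdefault-then-add, for every dict
lemma upd_eq (xv step : Int) (d : PySem.Dict Int (PySem.Set Int)) :
    (let d1 := if d.contains step = false then d.insert step PySem.Set.empty else d
     d1.modify step PySem.Set.empty (fun s => PySem.Set.add s xv)) =
    d.modify step PySem.Set.empty (fun st => PySem.Set.add st xv) := by
  have hm : ∀ (e : PySem.Dict Int (PySem.Set Int)),
      e.modify step PySem.Set.empty (fun s => PySem.Set.add s xv) =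
        e.insert step (PySem.Set.add (e.getD step PySem.Set.empty) xv) := fun _ => rfl
  show (if d.contains step = false then d.insert step PySem.Set.empty else d).modify
        step PySem.Set.empty (fun s => PySem.Set.add s xv) = _
  by_cases h : d.contains step = true
  · rw [if_neg (by simp [h])]
  · have hb : d.contains step = false := by simpa using h
    have hg : d.getD step PySem.Set.empty = PySem.Set.empty :=
      PySem.Dict.getD_of_not_contains _ _ hb
    rw [if_pos hb, hm, hm, PySem.Dict.getD_insert_self, PySem.Dict.insert_insert_self, hg]

-- ===== VERDICT (by name: the statement is the Claim_ definition above) =====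
theorem getPotentialXVelocities_spec : Claim_equal_getPotentialXVelocities := by
  intro xTarget _hdom hpre
  unfold Spec_getPotentialXVelocities
  unfold getPotentialXVelocities getPotentialXVelocities_alt
  have hlen : 2 ≤ xTarget.length := hpre
  refine congrArg PySem.Dict.items ?_
  refine PySem.List.foldl_congr_mem _ _ _ _ ?_
  intro d v hvmem
  have hv : 0 ≤ v := (PySem.List.mem_pyRange_one.mp hvmem).1
  rw [steps_eq xTarget hlen v hv]
  exact PySem.List.foldl_congr_mem _ _ _ _ (fun acc s _ => upd_eq v s acc)
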